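-- pv_equiv track=rewrite | github.com/wanglongjiang/leetcode | vip/easy/1065-index-pairs-of-a-string.py | indexPairs
-- ===== SOURCE A (Python) =====
-- from typing import List
--
-- def indexPairs(text: str, words: List[str]) -> List[List[int]]:
--     ans = []
--     for word in words:
--         i = 0
--         while i != -1:
--             i = text.find(word, i)
--             if i >= 0:
--                 ans.append([i, i + len(word) - 1])
--                 i += 1
--     ans.sort(key=lambda r: (r[0], r[1]))
--     return ans
-- ===== SOURCE B (Python) =====
-- from typing import List
--
-- def indexPairs(text: str, words: List[str]) -> List[List[int]]:
--     # Scan positions outer (words pre-sorted by length), emitting pairs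
--     # already in (start, end) order; no final sort needed.
--     by_len = sorted(words, key=len)
--     ans = []
--     for j in range(len(text) + 1):
--         for w in by_len:
--             if text[j:j + len(w)] == w:
--                 ans.append([j, j + len(w) - 1])
--     return ans
-- ===== Notes on version B (the rewrite author's own statement) =====
-- stated objective: alternative
-- what changed: B makes one outer pass over text positions, matching every word (pre-sorted by length) at each position and emitting pairs directly in (start,end) order, instead of A's per-word repeated str.find loops followed by a final sort.
import Mathlib
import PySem

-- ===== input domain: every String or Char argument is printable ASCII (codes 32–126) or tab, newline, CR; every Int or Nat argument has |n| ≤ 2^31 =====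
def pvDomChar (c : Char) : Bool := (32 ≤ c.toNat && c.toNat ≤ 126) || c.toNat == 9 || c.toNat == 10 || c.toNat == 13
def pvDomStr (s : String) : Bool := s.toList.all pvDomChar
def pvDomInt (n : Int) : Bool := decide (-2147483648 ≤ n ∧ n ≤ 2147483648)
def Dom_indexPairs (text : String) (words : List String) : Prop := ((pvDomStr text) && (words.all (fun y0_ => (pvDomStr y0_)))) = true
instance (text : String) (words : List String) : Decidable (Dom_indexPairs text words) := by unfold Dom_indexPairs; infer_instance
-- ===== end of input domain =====

-- B replaces A's per-word str.find loops + final sort by one outer pass over text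
-- positions (words pre-sorted by length), which emits the pairs already in
-- (start, end) order; same results, genuinely different traversal ("alternative").

-- ===== PORT A =====
-- the 'while i != -1' loop of A for one word; fuel bounds the iteration count
-- (at most len(text)+2 iterations recurse, since each match advances i by ≥ 1)
def pvFindLoop (text word : String) (i : Int) (acc : List (List Int)) : Nat → List (List Int)
  | 0 => acc
  | fuel + 1 =>
    if i = -1 then acc
    else
      let i2 := PySem.Str.findFrom text word i
      if 0 ≤ i2 then
        pvFindLoop text word (i2 + 1) (acc ++ [[i2, i2 + PySem.Str.len word - 1]]) fuel
      else
        pvFindLoop text word i2 acc fuel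

def indexPairs (text : String) (words : List String) : List (List Int) :=
  let ans := words.foldl (fun acc word => pvFindLoop text word 0 acc (text.toList.length + 2)) []
  -- ans.sort(key=lambda r: (r[0], r[1])): every row appended above is a 2-element
  -- list, on which the tuple key (r[0], r[1]) orders exactly as the lexicographic
  -- order on the lists themselves; exact here.
  PySem.List.sorted ans (fun r => r) false

-- ===== PORT B =====
def indexPairs_alt (text : String) (words : List String) : List (List Int) :=
  let byLen := PySem.List.sorted words (fun w => PySem.Str.len w) false
  (PySem.List.pyRange 0 (PySem.Str.len text + 1) 1).foldl (fun ans j =>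
    byLen.foldl (fun ans w =>
      if PySem.Str.slice text (some j) (some (j + PySem.Str.len w)) = w then
        ans ++ [[j, j + PySem.Str.len w - 1]]
      else ans) ans) []

-- ===== PRECONDITION & SPEC =====
def Spec_indexPairs (text : String) (words : List String) (out : List (List Int)) : Prop := out = indexPairs_alt text words
instance (text : String) (words : List String) (out : List (List Int)) : Decidable (Spec_indexPairs text words out) := by unfold Spec_indexPairs; infer_instance

-- ===== CLAIM (what is proved, stated in full; the proofs are below) =====
def Claim_equal_indexPairs : Prop := ∀ (text : String) (words : List String), Dom_indexPairs text words → Spec_indexPairs text words (indexPairs text words)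

-- ===== LEMMAS AND PROOFS =====

-- 'word occurs in text at position j'
def pvMatchAt (cs w : List Char) (j : Nat) : Bool := decide (w <+: cs.drop j)

-- the output row for word w at position j
def pvRow (w : List Char) (j : Nat) : List Int := [(j : Int), (j : Int) + (w.length : Int) - 1]

lemma pvFindLoop_neg_one (text word : String) (acc : List (List Int)) (fuel : Nat) :
    pvFindLoop text word (-1) acc fuel = acc := by
  cases fuel <;> simp [pvFindLoop]

lemma pvFindFrom_past_len (s sub : List Char) (i : Int) (h : (s.length : Int) < i) :
    PySem.Chars.findFrom s sub i none = -1 := by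
  simp only [PySem.Chars.findFrom]
  have h0 : ¬ i < 0 := by omega
  simp [h0]
  omega

-- characterisation of A's inner while loop: starting at k it appends exactly the
-- rows of the occurrences at positions k … len(text), in increasing order
lemma pvFindLoop_eq (text word : String) (fuel k : Nat) (acc : List (List Int))
    (hk : k ≤ text.toList.length + 1)
    (hfuel : text.toList.length + 2 ≤ fuel + k) :
    pvFindLoop text word (k : Int) acc fuel =
      acc ++ ((List.range' k (text.toList.length + 1 - k)).filter
        (fun j => pvMatchAt text.toList word.toList j)).map (pvRow word.toList) := by
  induction fuel generalizing k acc with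
  | zero => omega
  | succ fuel ih =>
    set cs := text.toList with hcs
    set ws := word.toList with hws
    set n := cs.length with hn
    have hkne : ((k : Int)) ≠ -1 := by omega
    rw [pvFindLoop]
    simp only [hkne, if_false]
    have hff : PySem.Str.findFrom text word (k : Int) = PySem.Chars.findFrom cs ws (k : Int) := rfl
    by_cases hklen : k ≤ n
    · -- k within the string
      by_cases hneg : PySem.Chars.findFrom cs ws (k : Int) = -1
      · -- no further occurrence: the loop exits; the remaining filter is empty
        have hnotin : ¬ ws <:+: cs.drop k :=
          (PySem.Chars.findFrom_natCast_eq_neg_one_iff cs ws k hklen).mp hneg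
        have hfe : (List.range' k (n + 1 - k)).filter (fun j => pvMatchAt cs ws j) = [] := by
          rw [List.filter_eq_nil_iff]
          intro j hj hmatch
          have hpre : ws <+: cs.drop j := of_decide_eq_true hmatch
          rcases List.mem_range'.mp hj with ⟨i, _, rfl⟩
          have : ws <+: (cs.drop k).drop (1 * i) := by
            rwa [List.drop_drop]
          exact hnotin ((PySem.Chars.isIn_iff_infix ws (cs.drop k)).mp
            ((PySem.Chars.exists_prefix_drop_iff_isIn ws (cs.drop k)).mp ⟨1 * i, this⟩))
        have h0le : ¬ (0 : Int) ≤ PySem.Chars.findFrom cs ws (k : Int) := by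
          rw [hneg]; omega
        rw [hff]
        simp only [hneg]
        rw [pvFindLoop_neg_one, hfe]
        simp
      · -- first occurrence at r := findFrom …
        obtain ⟨hkle, hpre, hmin⟩ := PySem.Chars.findFrom_natCast_spec cs ws k hklen hneg
        set i2 := PySem.Chars.findFrom cs ws (k : Int) with hi2
        have h0le : (0 : Int) ≤ i2 := by omega
        have hrle : i2 ≤ (n : Int) := by
          rw [hi2, PySem.Chars.findFrom_natCast cs ws k hklen]
          have h1 := PySem.Chars.find_le_length (cs.drop k) ws
          have h2 : ((cs.drop k).length : Int) = (n : Int) - k := by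
            simp [List.length_drop]; omega
          split <;> omega
        set r := i2.toNat with hr
        have hir : i2 = (r : Int) := by omega
        have hkr : k ≤ r := by omega
        have hrn : r ≤ n := by omega
        -- split the remaining range at the occurrence r
        have hsplit : List.range' k (n + 1 - k) =
            List.range' k (r - k) ++ List.range' r (n + 1 - r) := by
          have h := @List.range'_append k (r - k) (n + 1 - r) 1
          have e1 : k + 1 * (r - k) = r := by omega
          have e2 : r - k + (n + 1 - r) = n + 1 - k := by omega
          rw [e1, e2] at h
          exact h.symm
        have hfilter1 : (List.range' k (r - k)).filter (fun j => pvMatchAt cs ws j) = [] := by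
          rw [List.filter_eq_nil_iff]
          intro j hj hmatch
          rcases List.mem_range'.mp hj with ⟨i, hi, rfl⟩
          exact hmin (k + 1 * i) (by omega) (by omega) (of_decide_eq_true hmatch)
        have hmr : pvMatchAt cs ws r = true := decide_eq_true hpre
        have hfilter2 : (List.range' r (n + 1 - r)).filter (fun j => pvMatchAt cs ws j) =
            r :: (List.range' (r + 1) (n - r)).filter (fun j => pvMatchAt cs ws j) := by
          have h1 : n + 1 - r = (n - r) + 1 := by omega
          rw [h1, List.range'_succ, List.filter_cons, hmr]
          simp
        rw [hff]
        simp only [h0le, if_true]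
        have hrow : ([i2, i2 + PySem.Str.len word - 1] : List Int) = pvRow ws r := by
          simp [pvRow, PySem.Str.len, hir, hws]
        have hnext : i2 + 1 = ((r + 1 : Nat) : Int) := by omega
        rw [hrow, hnext, ih (r + 1) _ (by omega) (by omega)]
        rw [hsplit, List.filter_append, hfilter1, hfilter2]
        simp
    · -- k = len(text) + 1: find returns -1 (start past the end), loop exits
      have hk1 : k = n + 1 := by omega
      have hneg : PySem.Chars.findFrom cs ws (k : Int) = -1 :=
        pvFindFrom_past_len cs ws (k : Int) (by omega)
      have h0le : ¬ (0 : Int) ≤ PySem.Chars.findFrom cs ws (k : Int) := by rw [hneg]; omega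
      rw [hff]
      simp only [hneg]
      rw [pvFindLoop_neg_one]
      have : n + 1 - k = 0 := by omega
      simp [this]

-- A's unsorted list, in closed form
lemma pvAnsA_eq (text : String) (words : List String) :
    words.foldl (fun acc word => pvFindLoop text word 0 acc (text.toList.length + 2)) [] =
      words.flatMap (fun w =>
        ((List.range' 0 (text.toList.length + 1)).filter
          (fun j => pvMatchAt text.toList w.toList j)).map (pvRow w.toList)) := by
  rw [PySem.List.foldl_congr_mem words _
    (fun acc w => acc ++ ((List.range' 0 (text.toList.length + 1)).filter
      (fun j => pvMatchAt text.toList w.toList j)).map (pvRow w.toList)) []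
    (by
      intro acc w _
      have h := pvFindLoop_eq text w (text.toList.length + 2) 0 acc (by omega) (by omega)
      simpa using h)]
  rw [PySem.List.foldl_append_eq_flatMap]
  simp

lemma pvFoldl_ite_append {α β : Type} (p : α → Prop) [DecidablePred p] (f : α → β)
    (l : List α) (acc : List β) :
    l.foldl (fun ans x => if p x then ans ++ [f x] else ans) acc =
      acc ++ (l.filter (fun x => decide (p x))).map f := by
  induction l generalizing acc with
  | nil => simp
  | cons x t ih =>
    by_cases hx : p x <;> simp [hx, ih]

lemma pvPyRange_nat (m : Nat) :
    PySem.List.pyRange 0 (m : Int) 1 = (List.range m).map (fun (j : Nat) => (j : Int)) := by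
  simp only [PySem.List.pyRange]
  rcases Nat.eq_zero_or_pos m with h | h
  · subst h; simp
  · have h1 : (0 : Int) < (m : Int) := by exact_mod_cast h
    simp only [if_neg (by norm_num : ¬ (1 : Int) = 0), if_pos (by norm_num : (0:Int) < 1),
      if_pos h1]
    have : (((m : Int) - 0 + 1 - 1) / 1).toNat = m := by omega
    rw [this]
    simp

-- the matching condition in B, reduced to pvMatchAt
lemma pvSliceCond (text w : String) (j : Nat) :
    (PySem.Str.slice text (some (j : Int)) (some ((j : Int) + PySem.Str.len w)) = w) ↔
      w.toList <+: text.toList.drop j := by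
  have hcast : (j : Int) + PySem.Str.len w = ((j + w.toList.length : Nat) : Int) := by
    unfold PySem.Str.len; push_cast; ring
  unfold PySem.Str.slice
  rw [hcast]
  have hsl : PySem.Chars.slice text.toList (some (j : Int)) (some ((j + w.toList.length : Nat) : Int)) =
      List.take ((j + w.toList.length) - j) (List.drop j text.toList) :=
    PySem.List.slice_natCast text.toList j (j + w.toList.length)
  rw [hsl]
  have htk : (j + w.toList.length) - j = w.toList.length := by omega
  rw [htk]
  constructor
  · intro h
    have h2 : List.take w.toList.length (List.drop j text.toList) = w.toList := by
      have := congrArg String.toList h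
      simpa using this
    exact List.prefix_iff_eq_take.mpr h2.symm
  · intro h
    have h2 := (List.prefix_iff_eq_take.mp h).symm
    rw [h2]
    apply String.ext
    simp

-- B's result, in closed form: a flatMap over positions
lemma pvAnsB_eq (text : String) (words : List String) :
    indexPairs_alt text words =
      (List.range (text.toList.length + 1)).flatMap (fun j =>
        ((PySem.List.sorted words (fun w => PySem.Str.len w) false).filter
          (fun w => pvMatchAt text.toList w.toList j)).map (fun w => pvRow w.toList j)) := by
  have hB : indexPairs_alt text words =
      (PySem.List.pyRange 0 (PySem.Str.len text + 1) 1).foldl (fun ans j =>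
        (PySem.List.sorted words (fun w => PySem.Str.len w) false).foldl (fun ans w =>
          if PySem.Str.slice text (some j) (some (j + PySem.Str.len w)) = w then
            ans ++ [[j, j + PySem.Str.len w - 1]]
          else ans) ans) [] := rfl
  rw [hB]
  have hlen : PySem.Str.len text + 1 = ((text.toList.length + 1 : Nat) : Int) := by
    simp [PySem.Str.len]
  rw [hlen, pvPyRange_nat, List.foldl_map]
  have hfun : (fun (ans : List (List Int)) (j : Nat) =>
        (PySem.List.sorted words (fun w => PySem.Str.len w) false).foldl (fun ans w =>
          if PySem.Str.slice text (some (j : Int)) (some ((j : Int) + PySem.Str.len w)) = w then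
            ans ++ [[(j : Int), (j : Int) + PySem.Str.len w - 1]]
          else ans) ans) =
      (fun (ans : List (List Int)) (j : Nat) =>
        ans ++ (((PySem.List.sorted words (fun w => PySem.Str.len w) false).filter
          (fun w => pvMatchAt text.toList w.toList j)).map (fun w => pvRow w.toList j))) := by
    funext ans j
    rw [pvFoldl_ite_append
      (fun w => PySem.Str.slice text (some (j : Int)) (some ((j : Int) + PySem.Str.len w)) = w)
      (fun w => [(j : Int), (j : Int) + PySem.Str.len w - 1]) _ ans]
    congr 1
    have hfil : List.filter
          (fun x => decide (PySem.Str.slice text (some (j : Int)) (some ((j : Int) + PySem.Str.len x)) = x))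
          (PySem.List.sorted words (fun w => PySem.Str.len w) false) =
        List.filter (fun w => pvMatchAt text.toList w.toList j)
          (PySem.List.sorted words (fun w => PySem.Str.len w) false) := by
      apply List.filter_congr
      intro w _
      simp only [pvMatchAt]
      exact decide_eq_decide.mpr (pvSliceCond text w j)
    rw [hfil]
    apply List.map_congr_left
    intro w _
    simp [pvRow, PySem.Str.len]
  rw [hfun, PySem.List.foldl_append_eq_flatMap]
  simp

-- interchange of the two flatMap orders, up to permutation
lemma pvFlatMap_append_perm {α β : Type} (l : List α) (f g : α → List β) :
    (l.flatMap (fun x => f x ++ g x)).Perm (l.flatMap f ++ l.flatMap g) := by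
  induction l with
  | nil => simp
  | cons x t ih =>
    simp only [List.flatMap_cons]
    refine ((ih.append_left (f x ++ g x)).trans ?_)
    simp only [List.append_assoc]
    exact List.Perm.append_left _ (List.perm_append_comm_assoc _ _ _)

lemma pvFlatMap_ite_singleton {α β : Type} (js : List α) (p : α → Bool) (f : α → β) :
    js.flatMap (fun j => if p j then [f j] else []) = (js.filter p).map f := by
  induction js with
  | nil => simp
  | cons j t ih =>
    by_cases hj : p j <;> simp [hj, ih]

lemma pvSwap_perm (cs : List Char) (ws : List String) (js : List Nat) :
    (js.flatMap (fun j =>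
        (ws.filter (fun w => pvMatchAt cs w.toList j)).map (fun w => pvRow w.toList j))).Perm
      (ws.flatMap (fun w =>
        (js.filter (fun j => pvMatchAt cs w.toList j)).map (pvRow w.toList))) := by
  induction ws with
  | nil => simp
  | cons w t ih =>
    have hstep : ∀ j : Nat,
        (((w :: t).filter (fun w => pvMatchAt cs w.toList j)).map (fun w => pvRow w.toList j)) =
          (if pvMatchAt cs w.toList j then [pvRow w.toList j] else []) ++
            ((t.filter (fun w => pvMatchAt cs w.toList j)).map (fun w => pvRow w.toList j)) := by
      intro j
      by_cases hj : pvMatchAt cs w.toList j <;> simp [hj]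
    rw [List.flatMap_congr (fun j _ => hstep j)]
    refine (pvFlatMap_append_perm js _ _).trans ?_
    rw [pvFlatMap_ite_singleton js (fun j => pvMatchAt cs w.toList j) (fun j => pvRow w.toList j)]
    simp only [List.flatMap_cons]
    exact (List.Perm.refl _).append ih

-- lexicographic comparisons of rows
lemma pvRow_le_same_pos (w w' : List Char) (j : Nat) (h : w.length ≤ w'.length) :
    pvRow w j ≤ pvRow w' j := by
  unfold pvRow
  rcases lt_or_eq_of_le h with h' | h'
  · exact le_of_lt (List.Lex.cons (List.Lex.rel (by omega)))
  · rw [h']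
lemma pvRow_le_lt_pos (w w' : List Char) (j j' : Nat) (h : j < j') :
    pvRow w j ≤ pvRow w' j' := by
  unfold pvRow
  exact le_of_lt (List.Lex.rel (by exact_mod_cast h))

-- B's result is nondecreasing in the lexicographic order on rows
lemma pvAnsB_pairwise (text : String) (words : List String) :
    List.Pairwise (· ≤ ·)
      ((List.range (text.toList.length + 1)).flatMap (fun j =>
        ((PySem.List.sorted words (fun w => PySem.Str.len w) false).filter
          (fun w => pvMatchAt text.toList w.toList j)).map (fun w => pvRow w.toList j))) := by
  rw [List.pairwise_flatMap]
  constructor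
  · intro j _
    rw [List.pairwise_map]
    have h1 : List.Pairwise (fun a b => PySem.Str.len a ≤ PySem.Str.len b)
        (PySem.List.sorted words (fun w => PySem.Str.len w) false) :=
      PySem.List.sorted_pairwise words (fun w => PySem.Str.len w)
    refine (h1.filter _).imp ?_
    intro a b hab
    exact pvRow_le_same_pos a.toList b.toList j (by
      simp only [PySem.Str.len] at hab; exact_mod_cast hab)
  · refine List.pairwise_lt_range.imp ?_
    intro j j' hjj x hx y hy
    rcases List.mem_map.mp hx with ⟨w, _, rfl⟩
    rcases List.mem_map.mp hy with ⟨w', _, rfl⟩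
    exact pvRow_le_lt_pos w.toList w'.toList j j' hjj

-- ===== VERDICT (by name: the statement is the Claim_ definition above) =====
theorem indexPairs_spec : Claim_equal_indexPairs := by
  intro text words _
  unfold Spec_indexPairs
  have hA : indexPairs text words =
      PySem.List.sorted (words.foldl
        (fun acc word => pvFindLoop text word 0 acc (text.toList.length + 2)) [])
        (fun r => r) false := rfl
  rw [hA, pvAnsA_eq, pvAnsB_eq]
  have hrange : ∀ (w : String),
      ((List.range' 0 (text.toList.length + 1)).filter
        (fun j => pvMatchAt text.toList w.toList j)).map (pvRow w.toList) =
      ((List.range (text.toList.length + 1)).filter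
        (fun j => pvMatchAt text.toList w.toList j)).map (pvRow w.toList) := by
    intro w; rw [List.range_eq_range']
  rw [List.flatMap_congr (fun w _ => hrange w)]
  have hinst : (fun (a b : List Int) => a.decidableLT b) =
      (LinearOrder.toDecidableLT (α := List Int)) := by
    funext a b; exact Subsingleton.elim _ _
  rw [hinst]
  refine PySem.List.sorted_id_eq_of_perm_of_pairwise _ _ ?_ (pvAnsB_pairwise text words)
  -- B's flatMap is a permutation of A's
  refine (List.Perm.flatMap_left _ ?_).trans
    (pvSwap_perm text.toList words (List.range (text.toList.length + 1)))
  intro j _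
  exact ((PySem.List.sorted_perm words (fun w => PySem.Str.len w) false).filter _).map _
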